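-- pv_equiv track=rewrite | github.com/CorniiDog/lightning_research_application | lightning_parser_lib/number_crunchers/lightning_stitcher.py | filter_correlations_by_chain_size
-- ===== SOURCE A (Python) =====
-- def filter_correlations_by_chain_size(correlations, min_pts):
--     """
--     Filter out correlations that do not belong to a connected chain with at least min_pts nodes.
--
--     This function builds an undirected graph where each correlation (parent, child)
--     represents an edge. It then uses depth-first search (DFS) to identify connected
--     components. Only nodes within components that have at least min_pts nodes are considered valid.
--
--     Parameters:
--       correlations: List of tuples (parent, child) representing connections between events.
--       min_pts: Minimum number of nodes required for a chain to be considered valid.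
--
--     Returns:
--       A list of filtered correlations where both nodes belong to a valid chain.
--     """
--
--     # Build an undirected graph from the correlations.
--     graph = {}
--     for parent, child in correlations:
--         graph.setdefault(parent, set()).add(child)
--         graph.setdefault(child, set()).add(parent)
--
--     visited = set()
--     valid_nodes = set()
--
--     # Use DFS to find connected components.
--     for node in graph:
--         if node not in visited:
--             stack = [node]
--             component = set()
--             while stack:
--                 current = stack.pop()
--                 if current not in component:
--                     component.add(current)
--                     stack.extend(graph.get(current, []))
--             visited |= component
--             if len(component) >= min_pts:
--                 valid_nodes |= component
--
--     # Filter correlations: both parent and child must be in a valid chain.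
--     return [(p, c) for (p, c) in correlations if p in valid_nodes and c in valid_nodes]
-- ===== SOURCE B (Python) =====
-- def _pull(comps, x):
--     # remove and return the first block containing x, or a fresh singleton
--     for i, b in enumerate(comps):
--         if x in b:
--             return b, comps[:i] + comps[i + 1:]
--     return [x], comps
--
--
-- def filter_correlations_by_chain_size(correlations, min_pts):
--     # Union-by-merge: maintain a list of disjoint component blocks instead of
--     # building an adjacency dict and running DFS.
--     comps = []
--     for p, c in correlations:
--         bp, rest = _pull(comps, p)
--         if c in bp:
--             comps = [bp] + rest
--         else:
--             bc, rest2 = _pull(rest, c)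
--             comps = [bp + bc] + rest2
--
--     def ok(x):
--         for b in comps:
--             if x in b:
--                 return len(b) >= min_pts
--         return False
--
--     return [(p, c) for (p, c) in correlations if ok(p) and ok(c)]
-- ===== Notes on version B (the rewrite author's own statement) =====
-- stated objective: alternative
-- what changed: Replaces the adjacency-dict + explicit-stack DFS component search with a union-by-merge pass that folds the edge list into a list of disjoint component blocks, then filters by the block length of each endpoint.
import Mathlib
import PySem

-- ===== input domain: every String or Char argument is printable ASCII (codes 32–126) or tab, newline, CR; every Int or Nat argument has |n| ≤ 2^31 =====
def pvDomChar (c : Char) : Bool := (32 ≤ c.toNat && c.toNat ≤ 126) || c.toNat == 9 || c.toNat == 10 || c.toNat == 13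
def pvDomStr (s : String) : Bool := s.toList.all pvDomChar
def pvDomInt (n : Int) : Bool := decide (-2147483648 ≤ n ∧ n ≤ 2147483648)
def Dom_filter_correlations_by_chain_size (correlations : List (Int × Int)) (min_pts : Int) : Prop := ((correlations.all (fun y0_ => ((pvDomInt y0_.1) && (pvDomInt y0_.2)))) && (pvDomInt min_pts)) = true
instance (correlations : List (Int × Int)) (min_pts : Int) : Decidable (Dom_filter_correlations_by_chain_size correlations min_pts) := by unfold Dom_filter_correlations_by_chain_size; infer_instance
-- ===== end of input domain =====

-- B replaces A's adjacency-dict + explicit-stack DFS by a union-by-merge fold over the edge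
-- list maintaining disjoint component blocks (objective: alternative algorithm, similar cost).

-- ===== PORT A =====
-- graph.setdefault(parent, set()).add(child) mutates the dict entry in place:
-- graph[parent] = graph.get(parent, set()) ∪ {child} — exactly Dict.modify.
def pvGraph (correlations : List (Int × Int)) : PySem.Dict Int (PySem.Set Int) :=
  correlations.foldl (fun g pc =>
    (g.modify pc.1 PySem.Set.empty (fun s => PySem.Set.add s pc.2)).modify pc.2 PySem.Set.empty
      (fun s => PySem.Set.add s pc.1)) PySem.Dict.empty

-- two general filter-length facts, used by pvDfs's termination argument below
theorem pvFiltMono (l : List Int) (p q : Int → Bool) (himp : ∀ a ∈ l, q a = true → p a = true) :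
    (l.filter q).length ≤ (l.filter p).length := by
  induction l with
  | nil => simp
  | cons a t ih =>
    have ht := ih (fun b hb => himp b (List.mem_cons_of_mem _ hb))
    by_cases hq : q a = true
    · simp [hq, himp a (List.mem_cons_self) hq]; omega
    · simp only [List.filter_cons, Bool.not_eq_true] at *
      cases hp : p a <;> simp [hq] <;> omega

theorem pvFiltStrict (l : List Int) (p q : Int → Bool) (himp : ∀ a ∈ l, q a = true → p a = true)
    (x : Int) (hx : x ∈ l) (hpx : p x = true) (hqx : q x = false) :
    (l.filter q).length < (l.filter p).length := by
  induction l with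
  | nil => cases hx
  | cons a t ih =>
    have ht := pvFiltMono t p q (fun b hb => himp b (List.mem_cons_of_mem _ hb))
    rcases List.mem_cons.mp hx with rfl | hxt
    · simp [hpx, hqx]; omega
    · have := ih (fun b hb => himp b (List.mem_cons_of_mem _ hb)) hxt
      cases hq : q a
      · cases hp : p a <;> simp [hq, hp] <;> omega
      · simp [hq, himp a List.mem_cons_self hq]; omega

-- the Python `while stack:` DFS loop; Python pops from the end of the list and extends it with
-- a set (hash order) — the computed component is a set, so the visit order is immaterial, and
-- we pop from the head.  `graph.get(current, [])` is getD with default ∅.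
def pvDfs (g : PySem.Dict Int (PySem.Set Int)) (stack : List Int) (component : PySem.Set Int) :
    PySem.Set Int :=
  match stack with
  | [] => component
  | current :: rest =>
    if current ∈ component then pvDfs g rest component
    else pvDfs g (PySem.Dict.getD g current PySem.Set.empty ++ rest) (PySem.Set.add component current)
termination_by (((PySem.Dict.keys g).filter (fun k => decide (k ∉ component))).length, stack.length)
decreasing_by
  · exact Prod.Lex.right _ (Nat.lt_succ_self _)
  · rename_i h
    by_cases hk : current ∈ PySem.Dict.keys g
    · exact Prod.Lex.left _ _ (pvFiltStrict _ _ _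
        (fun a _ hq => by
          simp only [decide_eq_true_eq, PySem.Set.mem_add] at *; tauto)
        current hk (by simpa using h) (by simp [PySem.Set.mem_add]))
    · have hcf : PySem.Dict.contains g current = false := by
        simpa [PySem.Dict.contains_eq_decide_mem_keys] using hk
      have hg : PySem.Dict.getD g current PySem.Set.empty = PySem.Set.empty :=
        PySem.Dict.getD_of_not_contains _ _ hcf
      have hlen : ((PySem.Dict.keys g).filter (fun k => decide (k ∉ PySem.Set.add component current))).length
          = ((PySem.Dict.keys g).filter (fun k => decide (k ∉ component))).length := by
        refine congrArg List.length (List.filter_congr ?_)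
        intro k hkk
        have : k ≠ current := fun he => hk (he ▸ hkk)
        simp [PySem.Set.mem_add, this]
      rw [hg, hlen]
      exact Prod.Lex.right _ (by simp [PySem.Set.empty])

-- the `for node in graph:` loop carrying (visited, valid_nodes)
def pvOuter (g : PySem.Dict Int (PySem.Set Int)) (min_pts : Int) (nodes : List Int)
    (visited valid : PySem.Set Int) : PySem.Set Int × PySem.Set Int :=
  match nodes with
  | [] => (visited, valid)
  | node :: rest =>
    if node ∈ visited then pvOuter g min_pts rest visited valid
    else
      let component := pvDfs g [node] PySem.Set.empty
      let visited' := PySem.Set.union visited component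
      let valid' := if min_pts ≤ (component.length : Int) then PySem.Set.union valid component
                    else valid
      pvOuter g min_pts rest visited' valid'

def filter_correlations_by_chain_size (correlations : List (Int × Int)) (min_pts : Int) :
    List (Int × Int) :=
  let graph := pvGraph correlations
  let valid := (pvOuter graph min_pts (PySem.Dict.keys graph) PySem.Set.empty PySem.Set.empty).2
  correlations.filter (fun pc => PySem.Set.contains valid pc.1 && PySem.Set.contains valid pc.2)

-- ===== PORT B =====
-- _pull: remove and return the first block containing x, or a fresh singleton
def pvPull (comps : List (List Int)) (x : Int) : List Int × List (List Int) :=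
  match comps with
  | [] => ([x], [])
  | b :: rest =>
    if x ∈ b then (b, rest)
    else
      let r := pvPull rest x
      (r.1, b :: r.2)

def pvMerge (comps : List (List Int)) (p c : Int) : List (List Int) :=
  let r := pvPull comps p
  if c ∈ r.1 then r.1 :: r.2
  else
    let r2 := pvPull r.2 c
    (r.1 ++ r2.1) :: r2.2

def pvComps (correlations : List (Int × Int)) : List (List Int) :=
  correlations.foldl (fun comps pc => pvMerge comps pc.1 pc.2) []

-- ok(x): linear scan for x's block, then the size test
def pvOk (comps : List (List Int)) (min_pts : Int) (x : Int) : Bool :=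
  match comps.find? (fun b => decide (x ∈ b)) with
  | some b => decide (min_pts ≤ (b.length : Int))
  | none => false

def filter_correlations_by_chain_size_alt (correlations : List (Int × Int)) (min_pts : Int) :
    List (Int × Int) :=
  let comps := pvComps correlations
  correlations.filter (fun pc => pvOk comps min_pts pc.1 && pvOk comps min_pts pc.2)

-- ===== PRECONDITION & SPEC =====
def Spec_filter_correlations_by_chain_size (correlations : List (Int × Int)) (min_pts : Int) (out : List (Int × Int)) : Prop := out = filter_correlations_by_chain_size_alt correlations min_pts
instance (correlations : List (Int × Int)) (min_pts : Int) (out : List (Int × Int)) : Decidable (Spec_filter_correlations_by_chain_size correlations min_pts out) := by unfold Spec_filter_correlations_by_chain_size; infer_instance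

-- ===== CLAIM (what is proved, stated in full; the proofs are below) =====
def Claim_equal_filter_correlations_by_chain_size : Prop := ∀ (correlations : List (Int × Int)) (min_pts : Int), Dom_filter_correlations_by_chain_size correlations min_pts → Spec_filter_correlations_by_chain_size correlations min_pts (filter_correlations_by_chain_size correlations min_pts)

-- ===== LEMMAS AND PROOFS =====

-- x occurs as an endpoint of some edge of E
def pvAppear (E : List (Int × Int)) (x : Int) : Prop := ∃ pc ∈ E, x = pc.1 ∨ x = pc.2

-- S does not separate the endpoints of any edge of E
def pvClosed (E : List (Int × Int)) (S : Int → Prop) : Prop := ∀ pc ∈ E, (S pc.1 ↔ S pc.2)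

-- comps is the partition of E's endpoints into connected components
def pvGood (E : List (Int × Int)) (comps : List (List Int)) : Prop :=
  (∀ b ∈ comps, b.Nodup) ∧
  List.Pairwise (fun b b' => ∀ x, x ∈ b → x ∉ b') comps ∧
  (∀ b ∈ comps, ∀ x ∈ b, pvAppear E x) ∧
  (∀ x, pvAppear E x → ∃ b ∈ comps, x ∈ b) ∧
  (∀ pc ∈ E, ∃ b ∈ comps, pc.1 ∈ b ∧ pc.2 ∈ b) ∧
  (∀ b ∈ comps, ∀ x ∈ b, ∀ y ∈ b, ∀ S : Int → Prop, pvClosed E S → S x → S y)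

theorem pvClosed_weaken (E : List (Int × Int)) (e : Int × Int) (S : Int → Prop)
    (h : pvClosed (E ++ [e]) S) : pvClosed E S :=
  fun pc hpc => h pc (List.mem_append_left _ hpc)

theorem pvAppear_weaken (E : List (Int × Int)) (e : Int × Int) (x : Int)
    (h : pvAppear E x) : pvAppear (E ++ [e]) x := by
  obtain ⟨pc, hpc, hx⟩ := h; exact ⟨pc, List.mem_append_left _ hpc, hx⟩

theorem pvPull_spec (comps : List (List Int)) (x : Int) :
    ((∀ b ∈ comps, x ∉ b) ∧ pvPull comps x = ([x], comps)) ∨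
    (∃ l1 b l2, x ∈ b ∧ comps = l1 ++ b :: l2 ∧ pvPull comps x = (b, l1 ++ l2)) := by
  induction comps with
  | nil => left; exact ⟨by simp, rfl⟩
  | cons b rest ih =>
    by_cases hx : x ∈ b
    · right; exact ⟨[], b, rest, hx, rfl, by simp [pvPull, hx]⟩
    · rcases ih with ⟨hall, heq⟩ | ⟨l1, bb, l2, hxb, hsplit, heq⟩
      · left
        refine ⟨?_, by simp [pvPull, hx, heq]⟩
        intro b' hb'
        rcases List.mem_cons.mp hb' with rfl | h
        · exact hx
        · exact hall b' h
      · right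
        exact ⟨b :: l1, bb, l2, hxb, by simp [hsplit], by simp [pvPull, hx, heq]⟩

-- the single gluing step: all five shapes of pvMerge's result
theorem pvGood_glue (E : List (Int × Int)) (p c : Int) (bp bc : List Int)
    (r : List (List Int))
    (hnodp : bp.Nodup) (hnodc : bc.Nodup) (hdisj : ∀ x ∈ bp, x ∉ bc)
    (hpair : List.Pairwise (fun b b' => ∀ x, x ∈ b → x ∉ b') r)
    (hnodr : ∀ b ∈ r, b.Nodup)
    (hdis1 : ∀ b ∈ r, ∀ x ∈ bp, x ∉ b) (hdis2 : ∀ b ∈ r, ∀ x ∈ bc, x ∉ b)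
    (happ : ∀ x ∈ bp ++ bc, pvAppear E x ∨ x = p ∨ x = c)
    (happr : ∀ b ∈ r, ∀ x ∈ b, pvAppear E x)
    (hcov : ∀ x, pvAppear E x → x ∈ bp ++ bc ∨ ∃ b ∈ r, x ∈ b)
    (hedge : ∀ pc ∈ E, (pc.1 ∈ bp ++ bc ∧ pc.2 ∈ bp ++ bc) ∨ ∃ b ∈ r, pc.1 ∈ b ∧ pc.2 ∈ b)
    (hconnp : ∀ x ∈ bp, ∀ y ∈ bp, ∀ S : Int → Prop, pvClosed E S → S x → S y)
    (hconnc : ∀ x ∈ bc, ∀ y ∈ bc, ∀ S : Int → Prop, pvClosed E S → S x → S y)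
    (hpmem : p ∈ bp) (hcmem : (bc = [] ∧ c ∈ bp) ∨ c ∈ bc)
    (hconnr : ∀ b ∈ r, ∀ x ∈ b, ∀ y ∈ b, ∀ S : Int → Prop, pvClosed E S → S x → S y) :
    pvGood (E ++ [(p, c)]) ((bp ++ bc) :: r) := by
  have hpcE' : (p, c) ∈ E ++ [(p, c)] := List.mem_append_right _ List.mem_cons_self
  have hcbc : bc ≠ [] → c ∈ bc := by
    intro hne
    rcases hcmem with ⟨rfl, _⟩ | h
    · exact absurd rfl hne
    · exact h
  refine ⟨?_, ?_, ?_, ?_, ?_, ?_⟩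
  · intro b hb
    rcases List.mem_cons.mp hb with rfl | hb
    · exact List.Nodup.append hnodp hnodc hdisj
    · exact hnodr b hb
  · refine List.pairwise_cons.mpr ⟨?_, hpair⟩
    intro b hb x hx
    rcases List.mem_append.mp hx with hx | hx
    · exact hdis1 b hb x hx
    · exact hdis2 b hb x hx
  · intro b hb x hx
    rcases List.mem_cons.mp hb with rfl | hb
    · rcases happ x hx with h | rfl | rfl
      · exact pvAppear_weaken _ _ _ h
      · exact ⟨(x, c), hpcE', Or.inl rfl⟩
      · exact ⟨(p, x), hpcE', Or.inr rfl⟩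
    · exact pvAppear_weaken _ _ _ (happr b hb x hx)
  · intro x hx
    obtain ⟨pc, hpc, hxpc⟩ := hx
    rcases List.mem_append.mp hpc with hpc | hpc
    · rcases hcov x ⟨pc, hpc, hxpc⟩ with h | ⟨b, hb, hxb⟩
      · exact ⟨bp ++ bc, List.mem_cons_self, h⟩
      · exact ⟨b, List.mem_cons_of_mem _ hb, hxb⟩
    · have hpc' : pc = (p, c) := by simpa using hpc
      subst hpc'
      rcases hxpc with rfl | rfl
      · exact ⟨bp ++ bc, List.mem_cons_self, List.mem_append_left _ hpmem⟩
      · refine ⟨bp ++ bc, List.mem_cons_self, ?_⟩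
        rcases hcmem with ⟨_, h⟩ | h
        · exact List.mem_append_left _ h
        · exact List.mem_append_right _ h
  · intro pc hpc
    rcases List.mem_append.mp hpc with hpc | hpc
    · rcases hedge pc hpc with ⟨h1, h2⟩ | ⟨b, hb, h1, h2⟩
      · exact ⟨bp ++ bc, List.mem_cons_self, h1, h2⟩
      · exact ⟨b, List.mem_cons_of_mem _ hb, h1, h2⟩
    · have hpc' : pc = (p, c) := by simpa using hpc
      subst hpc'
      refine ⟨bp ++ bc, List.mem_cons_self, List.mem_append_left _ hpmem, ?_⟩
      rcases hcmem with ⟨_, h⟩ | h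
      · exact List.mem_append_left _ h
      · exact List.mem_append_right _ h
  · intro b hb x hx y hy S hS hSx
    have hSE : pvClosed E S := pvClosed_weaken _ _ _ hS
    rcases List.mem_cons.mp hb with rfl | hb
    · have hSpc : S p ↔ S c := hS (p, c) hpcE'
      rcases List.mem_append.mp hx with hx | hx <;> rcases List.mem_append.mp hy with hy | hy
      · exact hconnp x hx y hy S hSE hSx
      · have hcb : c ∈ bc := hcbc (List.ne_nil_of_mem hy)
        have hSp : S p := hconnp x hx p hpmem S hSE hSx
        exact hconnc c hcb y hy S hSE (hSpc.mp hSp)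
      · have hcb : c ∈ bc := hcbc (List.ne_nil_of_mem hx)
        have hSc : S c := hconnc x hx c hcb S hSE hSx
        exact hconnp p hpmem y hy S hSE (hSpc.mpr hSc)
      · exact hconnc x hx y hy S hSE hSx
    · exact hconnr b hb x hx y hy S hSE hSx

theorem pvMem_rest (l1 l2 : List (List Int)) (m b : List Int) (h : b ∈ l1 ++ l2) :
    b ∈ l1 ++ m :: l2 := by
  rcases List.mem_append.mp h with h | h
  · exact List.mem_append_left _ h
  · exact List.mem_append_right _ (List.mem_cons_of_mem _ h)

theorem pvMem_mid (l1 l2 : List (List Int)) (b b' : List Int) (h : b' ∈ l1 ++ b :: l2) :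
    b' = b ∨ b' ∈ l1 ++ l2 := by
  rcases List.mem_append.mp h with h | h
  · exact Or.inr (List.mem_append_left _ h)
  · rcases List.mem_cons.mp h with h | h
    · exact Or.inl h
    · exact Or.inr (List.mem_append_right _ h)

theorem pvPairwise_mid (l1 l2 : List (List Int)) (b : List Int)
    (h : List.Pairwise (fun b b' => ∀ x ∈ b, x ∉ b') (l1 ++ b :: l2)) :
    List.Pairwise (fun b b' => ∀ x ∈ b, x ∉ b') (l1 ++ l2) ∧
    (∀ b' ∈ l1 ++ l2, ∀ x ∈ b, x ∉ b') ∧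
    (∀ b' ∈ l1 ++ l2, ∀ x ∈ b', x ∉ b) := by
  obtain ⟨h1, h2, h3⟩ := List.pairwise_append.mp h
  obtain ⟨hb, h4⟩ := List.pairwise_cons.mp h2
  refine ⟨?_, ?_, ?_⟩
  · exact List.pairwise_append.mpr
      ⟨h1, h4, fun a ha b' hb' => h3 a ha b' (List.mem_cons_of_mem _ hb')⟩
  · intro b' hb' x hxb
    rcases List.mem_append.mp hb' with hmem | hmem
    · exact fun hxb' => (h3 b' hmem b List.mem_cons_self x hxb') hxb
    · exact hb b' hmem x hxb
  · intro b' hb' x hxb'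
    rcases List.mem_append.mp hb' with hmem | hmem
    · exact h3 b' hmem b List.mem_cons_self x hxb'
    · exact fun hxb => (hb b' hmem x hxb) hxb'

theorem pvGood_step (E : List (Int × Int)) (p c : Int) (comps : List (List Int))
    (h : pvGood E comps) : pvGood (E ++ [(p, c)]) (pvMerge comps p c) := by
  obtain ⟨hnod, hpair, happ, hcov, hedge, hconn⟩ := h
  have hsingNodup : ∀ z : Int, ([z] : List Int).Nodup := by simp
  have hsingConn : ∀ z : Int, ∀ x ∈ ([z] : List Int), ∀ y ∈ ([z] : List Int),
      ∀ S : Int → Prop, pvClosed E S → S x → S y := by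
    intro z x hx y hy S _ hSx
    have hxz : x = z := by simpa using hx
    have hyz : y = z := by simpa using hy
    exact hyz ▸ (hxz ▸ hSx)
  rcases pvPull_spec comps p with ⟨hpno, hpeq⟩ | ⟨l1, bp, l2, hpin, hsplit, hpeq⟩
  · -- p belongs to no existing block: bp = [p]
    by_cases hc : c ∈ ([p] : List Int)
    · have hres : pvMerge comps p c = ([p] ++ []) :: comps := by
        unfold pvMerge; rw [hpeq]; simp [hc]
      rw [hres]
      refine pvGood_glue E p c [p] [] comps (hsingNodup p) (by simp) (by simp) hpair hnod
        (fun b hb x hx => by simpa using (by simpa using hx : x = p) ▸ hpno b hb)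
        (by simp) (fun x hx => Or.inr (Or.inl (by simpa using hx))) happ
        (fun x hx => Or.inr (hcov x hx))
        (fun pc hpc => Or.inr (hedge pc hpc)) (hsingConn p) (by simp)
        (by simp) (Or.inl ⟨rfl, hc⟩) hconn
    · rcases pvPull_spec comps c with ⟨hcno, hceq⟩ | ⟨m1, bc, m2, hcin, hsplit2, hceq⟩
      · -- c also fresh
        have hres : pvMerge comps p c = ([p] ++ [c]) :: comps := by
          unfold pvMerge; rw [hpeq]; simp only [if_neg hc]; rw [hceq]
        rw [hres]
        have hpc_ne : (p : Int) ≠ c := fun he => hc (by simp [he])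
        refine pvGood_glue E p c [p] [c] comps (hsingNodup p) (hsingNodup c)
          (fun x hx => by
            have hxp : x = p := by simpa using hx
            simpa [hxp] using hpc_ne)
          hpair hnod
          (fun b hb x hx => (by simpa using hx : x = p) ▸ hpno b hb)
          (fun b hb x hx => (by simpa using hx : x = c) ▸ hcno b hb)
          (fun x hx => by
            rcases List.mem_append.mp hx with hx | hx
            · exact Or.inr (Or.inl (by simpa using hx))
            · exact Or.inr (Or.inr (by simpa using hx)))
          happ (fun x hx => Or.inr (hcov x hx)) (fun pc hpc => Or.inr (hedge pc hpc))
          (hsingConn p) (hsingConn c) (by simp) (Or.inr (by simp)) hconn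
      · -- c in an existing block bc
        have hres : pvMerge comps p c = ([p] ++ bc) :: (m1 ++ m2) := by
          unfold pvMerge; rw [hpeq]; simp only [if_neg hc]; rw [hceq]
        rw [hres]
        have hbcmem : bc ∈ comps := hsplit2 ▸ List.mem_append_right _ List.mem_cons_self
        obtain ⟨hmid1, hmid2, hmid3⟩ := pvPairwise_mid m1 m2 bc (hsplit2 ▸ hpair)
        have hrmem : ∀ b ∈ m1 ++ m2, b ∈ comps := fun b hb =>
          hsplit2 ▸ pvMem_rest m1 m2 bc b hb
        refine pvGood_glue E p c [p] bc (m1 ++ m2) (hsingNodup p) (hnod bc hbcmem)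
          (fun x hx => (by simpa using hx : x = p) ▸ hpno bc hbcmem)
          hmid1 (fun b hb => hnod b (hrmem b hb))
          (fun b hb x hx => (by simpa using hx : x = p) ▸ hpno b (hrmem b hb))
          hmid2
          (fun x hx => by
            rcases List.mem_append.mp hx with hx | hx
            · exact Or.inr (Or.inl (by simpa using hx))
            · exact Or.inl (happ bc hbcmem x hx))
          (fun b hb x hx => happ b (hrmem b hb) x hx)
          (fun x hx => by
            obtain ⟨b, hb, hxb⟩ := hcov x hx
            rcases pvMem_mid m1 m2 bc b (hsplit2 ▸ hb) with rfl | hb'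
            · exact Or.inl (List.mem_append_right _ hxb)
            · exact Or.inr ⟨b, hb', hxb⟩)
          (fun pc hpc => by
            obtain ⟨b, hb, h1, h2⟩ := hedge pc hpc
            rcases pvMem_mid m1 m2 bc b (hsplit2 ▸ hb) with rfl | hb'
            · exact Or.inl ⟨List.mem_append_right _ h1, List.mem_append_right _ h2⟩
            · exact Or.inr ⟨b, hb', h1, h2⟩)
          (hsingConn p) (hconn bc hbcmem) (by simp) (Or.inr hcin)
          (fun b hb => hconn b (hrmem b hb))
  · -- p in an existing block bp
    have hbpmem : bp ∈ comps := hsplit ▸ List.mem_append_right _ List.mem_cons_self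
    obtain ⟨hmidp1, hmidp2, hmidp3⟩ := pvPairwise_mid l1 l2 bp (hsplit ▸ hpair)
    have hrmemp : ∀ b ∈ l1 ++ l2, b ∈ comps := fun b hb => hsplit ▸ pvMem_rest l1 l2 bp b hb
    have hcovp : ∀ x, pvAppear E x → x ∈ bp ∨ ∃ b ∈ l1 ++ l2, x ∈ b := by
      intro x hx
      obtain ⟨b, hb, hxb⟩ := hcov x hx
      rcases pvMem_mid l1 l2 bp b (hsplit ▸ hb) with rfl | hb'
      · exact Or.inl hxb
      · exact Or.inr ⟨b, hb', hxb⟩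
    by_cases hc : c ∈ bp
    · have hres : pvMerge comps p c = (bp ++ []) :: (l1 ++ l2) := by
        unfold pvMerge; rw [hpeq]; simp [hc]
      rw [hres]
      refine pvGood_glue E p c bp [] (l1 ++ l2) (hnod bp hbpmem) (by simp) (by simp)
        hmidp1 (fun b hb => hnod b (hrmemp b hb)) hmidp2 (by simp)
        (fun x hx => Or.inl (happ bp hbpmem x (by simpa using hx)))
        (fun b hb x hx => happ b (hrmemp b hb) x hx)
        (fun x hx => by
          rcases hcovp x hx with h | ⟨b, hb, hxb⟩
          · exact Or.inl (List.mem_append_left _ h)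
          · exact Or.inr ⟨b, hb, hxb⟩)
        (fun pc hpc => by
          obtain ⟨b, hb, h1, h2⟩ := hedge pc hpc
          rcases pvMem_mid l1 l2 bp b (hsplit ▸ hb) with rfl | hb'
          · exact Or.inl ⟨List.mem_append_left _ h1, List.mem_append_left _ h2⟩
          · exact Or.inr ⟨b, hb', h1, h2⟩)
        (hconn bp hbpmem) (by simp) hpin (Or.inl ⟨rfl, hc⟩)
        (fun b hb => hconn b (hrmemp b hb))
    · rcases pvPull_spec (l1 ++ l2) c with ⟨hcno, hceq⟩ | ⟨m1, bc, m2, hcin, hsplit2, hceq⟩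
      · -- c fresh
        have hres : pvMerge comps p c = (bp ++ [c]) :: (l1 ++ l2) := by
          unfold pvMerge; rw [hpeq]; simp only [if_neg hc]; rw [hceq]
        rw [hres]
        refine pvGood_glue E p c bp [c] (l1 ++ l2) (hnod bp hbpmem) (hsingNodup c)
          (fun x hx => by
            simp only [List.mem_singleton]
            exact fun he => hc (he ▸ hx))
          hmidp1 (fun b hb => hnod b (hrmemp b hb)) hmidp2
          (fun b hb x hx => (by simpa using hx : x = c) ▸ hcno b hb)
          (fun x hx => by
            rcases List.mem_append.mp hx with hx | hx
            · exact Or.inl (happ bp hbpmem x hx)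
            · exact Or.inr (Or.inr (by simpa using hx)))
          (fun b hb x hx => happ b (hrmemp b hb) x hx)
          (fun x hx => by
            rcases hcovp x hx with h | ⟨b, hb, hxb⟩
            · exact Or.inl (List.mem_append_left _ h)
            · exact Or.inr ⟨b, hb, hxb⟩)
          (fun pc hpc => by
            obtain ⟨b, hb, h1, h2⟩ := hedge pc hpc
            rcases pvMem_mid l1 l2 bp b (hsplit ▸ hb) with rfl | hb'
            · exact Or.inl ⟨List.mem_append_left _ h1, List.mem_append_left _ h2⟩
            · exact Or.inr ⟨b, hb', h1, h2⟩)
          (hconn bp hbpmem) (hsingConn c) hpin (Or.inr (by simp))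
          (fun b hb => hconn b (hrmemp b hb))
      · -- c in another existing block bc
        have hres : pvMerge comps p c = (bp ++ bc) :: (m1 ++ m2) := by
          unfold pvMerge; rw [hpeq]; simp only [if_neg hc]; rw [hceq]
        rw [hres]
        have hbcrest : bc ∈ l1 ++ l2 := hsplit2 ▸ List.mem_append_right _ List.mem_cons_self
        have hbcmem : bc ∈ comps := hrmemp bc hbcrest
        obtain ⟨hmidc1, hmidc2, hmidc3⟩ := pvPairwise_mid m1 m2 bc (hsplit2 ▸ hmidp1)
        have hrmemc : ∀ b ∈ m1 ++ m2, b ∈ l1 ++ l2 := fun b hb =>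
          hsplit2 ▸ pvMem_rest m1 m2 bc b hb
        refine pvGood_glue E p c bp bc (m1 ++ m2) (hnod bp hbpmem) (hnod bc hbcmem)
          (fun x hx => hmidp2 bc hbcrest x hx)
          hmidc1 (fun b hb => hnod b (hrmemp b (hrmemc b hb)))
          (fun b hb x hx => hmidp2 b (hrmemc b hb) x hx)
          hmidc2
          (fun x hx => by
            rcases List.mem_append.mp hx with hx | hx
            · exact Or.inl (happ bp hbpmem x hx)
            · exact Or.inl (happ bc hbcmem x hx))
          (fun b hb x hx => happ b (hrmemp b (hrmemc b hb)) x hx)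
          (fun x hx => by
            rcases hcovp x hx with h | ⟨b, hb, hxb⟩
            · exact Or.inl (List.mem_append_left _ h)
            · rcases pvMem_mid m1 m2 bc b (hsplit2 ▸ hb) with rfl | hb'
              · exact Or.inl (List.mem_append_right _ hxb)
              · exact Or.inr ⟨b, hb', hxb⟩)
          (fun pc hpc => by
            obtain ⟨b, hb, h1, h2⟩ := hedge pc hpc
            rcases pvMem_mid l1 l2 bp b (hsplit ▸ hb) with rfl | hb'
            · exact Or.inl ⟨List.mem_append_left _ h1, List.mem_append_left _ h2⟩
            · rcases pvMem_mid m1 m2 bc b (hsplit2 ▸ hb') with rfl | hb''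
              · exact Or.inl ⟨List.mem_append_right _ h1, List.mem_append_right _ h2⟩
              · exact Or.inr ⟨b, hb'', h1, h2⟩)
          (hconn bp hbpmem) (hconn bc hbcmem) hpin (Or.inr hcin)
          (fun b hb => hconn b (hrmemp b (hrmemc b hb)))

theorem pvComps_good (E : List (Int × Int)) : pvGood E (pvComps E) := by
  have hbase : pvGood [] [] := by
    refine ⟨by simp, List.Pairwise.nil, by simp, ?_, by simp, by simp⟩
    rintro x ⟨pc, hpc, _⟩
    cases hpc
  have haux : ∀ (l : List (Int × Int)) (seen : List (Int × Int)) (comps : List (List Int)),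
      pvGood seen comps →
        pvGood (seen ++ l) (l.foldl (fun comps pc => pvMerge comps pc.1 pc.2) comps) := by
    intro l
    induction l with
    | nil => intro seen comps h; simpa using h
    | cons e t ih =>
      intro seen comps h
      have hstep := pvGood_step seen e.1 e.2 comps h
      have he : (e.1, e.2) = e := rfl
      rw [he] at hstep
      rw [List.append_cons]
      exact ih (seen ++ [e]) (pvMerge comps e.1 e.2) hstep
  simpa using haux E [] [] hbase

-- block uniqueness
theorem pvBlock_unique (E : List (Int × Int)) (comps : List (List Int)) (h : pvGood E comps)
    (b b' : List Int) (hb : b ∈ comps) (hb' : b' ∈ comps) (x : Int) (hx : x ∈ b)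
    (hx' : x ∈ b') : b = b' := by
  by_contra hne
  exact (h.2.1.forall (fun _ _ hr y hy hy' => hr y hy' hy) hb hb' hne) x hx hx'

def pvGStep (g : PySem.Dict Int (PySem.Set Int)) (pc : Int × Int) :
    PySem.Dict Int (PySem.Set Int) :=
  (g.modify pc.1 PySem.Set.empty (fun s => PySem.Set.add s pc.2)).modify pc.2 PySem.Set.empty
    (fun s => PySem.Set.add s pc.1)

theorem pvGraph_eq_foldl (E : List (Int × Int)) : pvGraph E = E.foldl pvGStep PySem.Dict.empty :=
  rfl

theorem pvGraph_aux_getD (l : List (Int × Int)) (g : PySem.Dict Int (PySem.Set Int)) (x y : Int) :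
    y ∈ PySem.Dict.getD (l.foldl pvGStep g) x PySem.Set.empty ↔
      y ∈ PySem.Dict.getD g x PySem.Set.empty ∨ (x, y) ∈ l ∨ (y, x) ∈ l := by
  induction l generalizing g with
  | nil => simp
  | cons e t ih =>
    rw [List.foldl_cons, ih]
    have hstep : y ∈ PySem.Dict.getD (pvGStep g e) x PySem.Set.empty ↔
        y ∈ PySem.Dict.getD g x PySem.Set.empty ∨ (x = e.1 ∧ y = e.2) ∨ (x = e.2 ∧ y = e.1) := by
      unfold pvGStep
      simp only [PySem.Dict.getD_modify]
      by_cases h1 : x = e.1 <;> by_cases h2 : x = e.2 <;> by_cases he : e.1 = e.2 <;>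
        simp_all [PySem.Set.mem_add]
    rw [hstep]
    constructor
    · rintro (h | h)
      · rcases h with h | ⟨rfl, rfl⟩ | ⟨rfl, rfl⟩
        · tauto
        · exact Or.inr (Or.inl (List.mem_cons_self))
        · exact Or.inr (Or.inr (List.mem_cons_self))
      · tauto
    · rintro (h | h | h)
      · tauto
      · rcases List.mem_cons.mp h with h | h
        · exact Or.inl (Or.inr (Or.inl ⟨(congrArg Prod.fst h).symm ▸ rfl,
            (congrArg Prod.snd h).symm ▸ rfl⟩))
        · tauto
      · rcases List.mem_cons.mp h with h | h
        · exact Or.inl (Or.inr (Or.inr ⟨congrArg Prod.snd h, congrArg Prod.fst h⟩))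
        · tauto

theorem pvGraph_aux_keys (l : List (Int × Int)) (g : PySem.Dict Int (PySem.Set Int)) (x : Int) :
    x ∈ PySem.Dict.keys (l.foldl pvGStep g) ↔
      x ∈ PySem.Dict.keys g ∨ ∃ pc ∈ l, x = pc.1 ∨ x = pc.2 := by
  induction l generalizing g with
  | nil => simp
  | cons e t ih =>
    rw [List.foldl_cons, ih]
    have hstep : x ∈ PySem.Dict.keys (pvGStep g e) ↔
        x ∈ PySem.Dict.keys g ∨ x = e.1 ∨ x = e.2 := by
      unfold pvGStep
      simp [PySem.Dict.keys_modify, PySem.Dict.mem_keys_insert]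
      tauto
    rw [hstep]
    constructor
    · rintro ((h | h | h) | ⟨pc, hpc, hx⟩)
      · exact Or.inl h
      · exact Or.inr ⟨e, List.mem_cons_self, Or.inl h⟩
      · exact Or.inr ⟨e, List.mem_cons_self, Or.inr h⟩
      · exact Or.inr ⟨pc, List.mem_cons_of_mem _ hpc, hx⟩
    · rintro (h | ⟨pc, hpc, hx⟩)
      · exact Or.inl (Or.inl h)
      · rcases List.mem_cons.mp hpc with rfl | hpc
        · rcases hx with h | h
          · exact Or.inl (Or.inr (Or.inl h))
          · exact Or.inl (Or.inr (Or.inr h))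
        · exact Or.inr ⟨pc, hpc, hx⟩

-- graph characterisation
theorem pvGraph_getD_mem (E : List (Int × Int)) (x y : Int) :
    y ∈ PySem.Dict.getD (pvGraph E) x PySem.Set.empty ↔ (x, y) ∈ E ∨ (y, x) ∈ E := by
  rw [pvGraph_eq_foldl, pvGraph_aux_getD]
  simp

theorem pvGraph_keys_mem (E : List (Int × Int)) (x : Int) :
    x ∈ PySem.Dict.keys (pvGraph E) ↔ pvAppear E x := by
  rw [pvGraph_eq_foldl, pvGraph_aux_keys]
  unfold pvAppear
  simp

-- DFS facts
theorem pvDfs_superset (g : PySem.Dict Int (PySem.Set Int)) (stack : List Int)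
    (component : PySem.Set Int) (x : Int) (h : x ∈ component ∨ x ∈ stack) :
    x ∈ pvDfs g stack component := by
  fun_induction pvDfs g stack component with
  | case1 => simpa using h
  | case2 current rest component hmem ih =>
    refine ih ?_
    rcases h with h | h
    · exact Or.inl h
    · rcases List.mem_cons.mp h with rfl | h
      · exact Or.inl hmem
      · exact Or.inr h
  | case3 current rest component hmem ih =>
    refine ih ?_
    rcases h with h | h
    · exact Or.inl (by simp [PySem.Set.mem_add, h])
    · rcases List.mem_cons.mp h with rfl | h
      · exact Or.inl (by simp [PySem.Set.mem_add])
      · exact Or.inr (by simp [h])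

theorem pvDfs_subset (g : PySem.Dict Int (PySem.Set Int)) (stack : List Int)
    (component : PySem.Set Int) (T : Int → Prop)
    (hstack : ∀ s ∈ stack, T s) (hcomp : ∀ x ∈ component, T x)
    (hclosed : ∀ x, T x → ∀ y ∈ PySem.Dict.getD g x PySem.Set.empty, T y) :
    ∀ x ∈ pvDfs g stack component, T x := by
  fun_induction pvDfs g stack component with
  | case1 => exact hcomp
  | case2 component current rest hmem ih =>
    exact ih (fun s hs => hstack s (List.mem_cons_of_mem _ hs)) hcomp
  | case3 component current rest hmem ih =>
    refine ih ?_ ?_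
    · intro s hs
      rcases List.mem_append.mp hs with hs | hs
      · exact hclosed current (hstack current List.mem_cons_self) s hs
      · exact hstack s (List.mem_cons_of_mem _ hs)
    · intro x hx
      rcases (PySem.Set.mem_add _ _ _).mp hx with hx | rfl
      · exact hcomp x hx
      · exact hstack x List.mem_cons_self

theorem pvDfs_closed (g : PySem.Dict Int (PySem.Set Int)) (stack : List Int)
    (component : PySem.Set Int)
    (hinv : ∀ x ∈ component, ∀ y ∈ PySem.Dict.getD g x PySem.Set.empty,
      y ∈ component ∨ y ∈ stack) :
    ∀ x ∈ pvDfs g stack component, ∀ y ∈ PySem.Dict.getD g x PySem.Set.empty,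
      y ∈ pvDfs g stack component := by
  fun_induction pvDfs g stack component with
  | case1 =>
    intro x hx y hy
    rcases hinv x hx y hy with h | h
    · exact h
    · cases h
  | case2 component current rest hmem ih =>
    refine ih ?_
    intro x hx y hy
    rcases hinv x hx y hy with h | h
    · exact Or.inl h
    · rcases List.mem_cons.mp h with rfl | h
      · exact Or.inl hmem
      · exact Or.inr h
  | case3 component current rest hmem ih =>
    refine ih ?_
    intro x hx y hy
    rcases (PySem.Set.mem_add _ _ _).mp hx with hx | rfl
    · rcases hinv x hx y hy with h | h
      · exact Or.inl (by simp [PySem.Set.mem_add, h])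
      · rcases List.mem_cons.mp h with rfl | h
        · exact Or.inl (by simp [PySem.Set.mem_add])
        · exact Or.inr (List.mem_append_right _ h)
    · exact Or.inr (List.mem_append_left _ hy)

theorem pvDfs_nodup (g : PySem.Dict Int (PySem.Set Int)) (stack : List Int)
    (component : PySem.Set Int) (h : component.Nodup) : (pvDfs g stack component).Nodup := by
  fun_induction pvDfs g stack component with
  | case1 => exact h
  | case2 component current rest hmem ih => exact ih h
  | case3 component current rest hmem ih => exact ih (PySem.Set.nodup_add _ _ h)

-- a DFS from n computes exactly n's block of the merge partition
theorem pvDfs_eq_block (E : List (Int × Int)) (h : pvGood E (pvComps E)) (n : Int)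
    (bn : List Int) (hbn : bn ∈ pvComps E) (hn : n ∈ bn) :
    (∀ x, x ∈ pvDfs (pvGraph E) [n] PySem.Set.empty ↔ x ∈ bn) ∧
      (pvDfs (pvGraph E) [n] PySem.Set.empty).length = bn.length := by
  obtain ⟨hnod, hpair, happ, hcov, hedge, hconn⟩ := h
  have hGood : pvGood E (pvComps E) := ⟨hnod, hpair, happ, hcov, hedge, hconn⟩
  have hsub : ∀ x ∈ pvDfs (pvGraph E) [n] PySem.Set.empty, x ∈ bn := by
    refine pvDfs_subset _ _ _ (· ∈ bn) ?_ (by simp [PySem.Set.empty]) ?_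
    · intro s hs; rcases List.mem_cons.mp hs with rfl | hs
      · exact hn
      · cases hs
    · intro x hx y hy
      rcases (pvGraph_getD_mem E x y).mp hy with hxy | hxy
      · obtain ⟨b', hb', h1, h2⟩ := hedge (x, y) hxy
        exact (pvBlock_unique E _ hGood b' bn hb' hbn x h1 hx) ▸ h2
      · obtain ⟨b', hb', h1, h2⟩ := hedge (y, x) hxy
        exact (pvBlock_unique E _ hGood b' bn hb' hbn x h2 hx) ▸ h1
  have hmemn : n ∈ pvDfs (pvGraph E) [n] PySem.Set.empty :=
    pvDfs_superset _ _ _ n (Or.inr List.mem_cons_self)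
  have hclosedC : ∀ x ∈ pvDfs (pvGraph E) [n] PySem.Set.empty,
      ∀ y ∈ PySem.Dict.getD (pvGraph E) x PySem.Set.empty,
        y ∈ pvDfs (pvGraph E) [n] PySem.Set.empty :=
    pvDfs_closed _ _ _ (by simp [PySem.Set.empty])
  have hsup : ∀ x ∈ bn, x ∈ pvDfs (pvGraph E) [n] PySem.Set.empty := by
    intro y hy
    have hS : pvClosed E (fun z => z ∈ pvDfs (pvGraph E) [n] PySem.Set.empty ∨ ¬ pvAppear E z) := by
      intro pc hpc
      have ha1 : pvAppear E pc.1 := ⟨pc, hpc, Or.inl rfl⟩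
      have ha2 : pvAppear E pc.2 := ⟨pc, hpc, Or.inr rfl⟩
      have hmem12 : pc.1 ∈ pvDfs (pvGraph E) [n] PySem.Set.empty →
          pc.2 ∈ pvDfs (pvGraph E) [n] PySem.Set.empty := by
        intro h1
        refine hclosedC pc.1 h1 pc.2 ((pvGraph_getD_mem E pc.1 pc.2).mpr (Or.inl ?_))
        simpa using hpc
      have hmem21 : pc.2 ∈ pvDfs (pvGraph E) [n] PySem.Set.empty →
          pc.1 ∈ pvDfs (pvGraph E) [n] PySem.Set.empty := by
        intro h2
        refine hclosedC pc.2 h2 pc.1 ((pvGraph_getD_mem E pc.2 pc.1).mpr (Or.inr ?_))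
        simpa using hpc
      constructor
      · rintro (h | h)
        · exact Or.inl (hmem12 h)
        · exact absurd ha1 h
      · rintro (h | h)
        · exact Or.inl (hmem21 h)
        · exact absurd ha2 h
    have := hconn bn hbn n hn y hy _ hS (Or.inl hmemn)
    rcases this with h | h
    · exact h
    · exact absurd (happ bn hbn y hy) h
  refine ⟨fun x => ⟨hsub x, hsup x⟩, ?_⟩
  have hcn : (pvDfs (pvGraph E) [n] PySem.Set.empty).Nodup :=
    pvDfs_nodup _ _ _ (by simp [PySem.Set.empty])
  exact ((List.perm_ext_iff_of_nodup hcn (hnod bn hbn)).mpr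
    (fun x => ⟨hsub x, hsup x⟩)).length_eq

theorem pvOuter_spec (E : List (Int × Int)) (min_pts : Int) (h : pvGood E (pvComps E))
    (nodes : List Int) (visited valid : PySem.Set Int)
    (hn : ∀ k ∈ nodes, pvAppear E k)
    (hV1 : ∀ x ∈ visited, ∃ b ∈ pvComps E, x ∈ b ∧ ∀ y ∈ b, y ∈ visited)
    (hV2 : ∀ x, x ∈ valid ↔ x ∈ visited ∧ ∃ b ∈ pvComps E, x ∈ b ∧ min_pts ≤ (b.length : Int)) :
    (∀ x ∈ visited, x ∈ (pvOuter (pvGraph E) min_pts nodes visited valid).1) ∧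
    (∀ k ∈ nodes, k ∈ (pvOuter (pvGraph E) min_pts nodes visited valid).1) ∧
    (∀ x, x ∈ (pvOuter (pvGraph E) min_pts nodes visited valid).2 ↔
      x ∈ (pvOuter (pvGraph E) min_pts nodes visited valid).1 ∧
        ∃ b ∈ pvComps E, x ∈ b ∧ min_pts ≤ (b.length : Int)) := by
  induction nodes generalizing visited valid with
  | nil =>
    refine ⟨fun x hx => by simpa [pvOuter] using hx, by simp, fun x => ?_⟩
    simpa [pvOuter] using hV2 x
  | cons node rest ih =>
    by_cases hvis : node ∈ visited
    · rw [pvOuter, if_pos hvis]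
      obtain ⟨c1, c2, c3⟩ := ih visited valid (fun k hk => hn k (List.mem_cons_of_mem _ hk)) hV1 hV2
      refine ⟨c1, ?_, c3⟩
      intro k hk
      rcases List.mem_cons.mp hk with rfl | hk
      · exact c1 k hvis
      · exact c2 k hk
    · rw [pvOuter, if_neg hvis]
      obtain ⟨bn, hbn, hnb⟩ := h.2.2.2.1 node (hn node List.mem_cons_self)
      obtain ⟨hCmem, hClen⟩ := pvDfs_eq_block E h node bn hbn hnb
      set C := pvDfs (pvGraph E) [node] PySem.Set.empty with hCdef
      have hV1' : ∀ x ∈ PySem.Set.union visited C, ∃ b ∈ pvComps E, x ∈ b ∧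
          ∀ y ∈ b, y ∈ PySem.Set.union visited C := by
        intro x hx
        rcases (PySem.Set.mem_union _ _ _).mp hx with hx | hx
        · obtain ⟨b, hb, hxb, hsub⟩ := hV1 x hx
          exact ⟨b, hb, hxb, fun y hy => (PySem.Set.mem_union _ _ _).mpr (Or.inl (hsub y hy))⟩
        · exact ⟨bn, hbn, (hCmem x).mp hx,
            fun y hy => (PySem.Set.mem_union _ _ _).mpr (Or.inr ((hCmem y).mpr hy))⟩
      have hV2' : ∀ x, x ∈ (if min_pts ≤ ((C.length : Nat) : Int) then PySem.Set.union valid C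
            else valid) ↔
          x ∈ PySem.Set.union visited C ∧
            ∃ b ∈ pvComps E, x ∈ b ∧ min_pts ≤ (b.length : Int) := by
        intro x
        by_cases hbig : min_pts ≤ ((C.length : Nat) : Int)
        · rw [if_pos hbig]
          constructor
          · intro hx
            rcases (PySem.Set.mem_union _ _ _).mp hx with hx | hx
            · obtain ⟨hxv, hb⟩ := (hV2 x).mp hx
              exact ⟨(PySem.Set.mem_union _ _ _).mpr (Or.inl hxv), hb⟩
            · refine ⟨(PySem.Set.mem_union _ _ _).mpr (Or.inr hx), bn, hbn, (hCmem x).mp hx, ?_⟩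
              rw [← hClen]; exact hbig
          · rintro ⟨hxv, hb⟩
            rcases (PySem.Set.mem_union _ _ _).mp hxv with hxv | hxv
            · exact (PySem.Set.mem_union _ _ _).mpr (Or.inl ((hV2 x).mpr ⟨hxv, hb⟩))
            · exact (PySem.Set.mem_union _ _ _).mpr (Or.inr hxv)
        · rw [if_neg hbig]
          constructor
          · intro hx
            obtain ⟨hxv, hb⟩ := (hV2 x).mp hx
            exact ⟨(PySem.Set.mem_union _ _ _).mpr (Or.inl hxv), hb⟩
          · rintro ⟨hxv, b, hb, hxb, hblen⟩
            rcases (PySem.Set.mem_union _ _ _).mp hxv with hxv | hxv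
            · exact (hV2 x).mpr ⟨hxv, b, hb, hxb, hblen⟩
            · have hbbn : b = bn := pvBlock_unique E _ h b bn hb hbn x hxb ((hCmem x).mp hxv)
              exact absurd (hClen ▸ (hbbn ▸ hblen)) hbig
      obtain ⟨c1, c2, c3⟩ := ih _ _ (fun k hk => hn k (List.mem_cons_of_mem _ hk)) hV1' hV2'
      refine ⟨?_, ?_, c3⟩
      · intro x hx
        exact c1 x ((PySem.Set.mem_union _ _ _).mpr (Or.inl hx))
      · intro k hk
        rcases List.mem_cons.mp hk with rfl | hk
        · refine c1 k ((PySem.Set.mem_union _ _ _).mpr (Or.inr ?_))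
          exact pvDfs_superset _ _ _ k (Or.inr List.mem_cons_self)
        · exact c2 k hk

theorem pvValid_char (E : List (Int × Int)) (min_pts : Int) (x : Int) :
    x ∈ (pvOuter (pvGraph E) min_pts (PySem.Dict.keys (pvGraph E)) PySem.Set.empty
        PySem.Set.empty).2 ↔
      pvAppear E x ∧ ∃ b ∈ pvComps E, x ∈ b ∧ min_pts ≤ (b.length : Int) := by
  have hg := pvComps_good E
  obtain ⟨c1, c2, c3⟩ := pvOuter_spec E min_pts hg (PySem.Dict.keys (pvGraph E))
    PySem.Set.empty PySem.Set.empty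
    (fun k hk => (pvGraph_keys_mem E k).mp hk)
    (by simp [PySem.Set.empty])
    (by simp [PySem.Set.empty])
  constructor
  · intro hx
    obtain ⟨hx1, b, hb, hxb, hlen⟩ := (c3 x).mp hx
    exact ⟨hg.2.2.1 b hb x hxb, b, hb, hxb, hlen⟩
  · rintro ⟨ha, b, hb, hxb, hlen⟩
    exact (c3 x).mpr ⟨c2 x ((pvGraph_keys_mem E x).mpr ha), b, hb, hxb, hlen⟩

theorem pvOk_char (E : List (Int × Int)) (min_pts : Int) (x : Int) :
    pvOk (pvComps E) min_pts x = true ↔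
      pvAppear E x ∧ ∃ b ∈ pvComps E, x ∈ b ∧ min_pts ≤ (b.length : Int) := by
  have hg := pvComps_good E
  unfold pvOk
  cases hfind : (pvComps E).find? (fun b => decide (x ∈ b)) with
  | none =>
    have hnone := List.find?_eq_none.mp hfind
    simp only []
    constructor
    · intro h; cases h
    · rintro ⟨ha, b, hb, hxb, hlen⟩
      exact absurd (by simpa using hxb) (hnone b hb)
  | some b =>
    have hxb : x ∈ b := by simpa using List.find?_some hfind
    have hb : b ∈ pvComps E := List.mem_of_find?_eq_some hfind
    simp only [decide_eq_true_eq]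
    constructor
    · intro hlen
      exact ⟨hg.2.2.1 b hb x hxb, b, hb, hxb, hlen⟩
    · rintro ⟨ha, b', hb', hxb', hlen'⟩
      exact (pvBlock_unique E _ hg b' b hb' hb x hxb' hxb) ▸ hlen'

-- ===== VERDICT (by name: the statement is the Claim_ definition above) =====
theorem filter_correlations_by_chain_size_spec : Claim_equal_filter_correlations_by_chain_size := by
  intro E min_pts _
  unfold Spec_filter_correlations_by_chain_size
  unfold filter_correlations_by_chain_size filter_correlations_by_chain_size_alt
  refine List.filter_congr ?_
  intro pc _
  have h1 := pvValid_char E min_pts pc.1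
  have h2 := pvValid_char E min_pts pc.2
  have k1 := pvOk_char E min_pts pc.1
  have k2 := pvOk_char E min_pts pc.2
  have e1 : PySem.Set.contains (pvOuter (pvGraph E) min_pts (PySem.Dict.keys (pvGraph E))
      PySem.Set.empty PySem.Set.empty).2 pc.1 = pvOk (pvComps E) min_pts pc.1 := by
    rw [Bool.eq_iff_iff, PySem.Set.contains_iff, h1, k1]
  have e2 : PySem.Set.contains (pvOuter (pvGraph E) min_pts (PySem.Dict.keys (pvGraph E))
      PySem.Set.empty PySem.Set.empty).2 pc.2 = pvOk (pvComps E) min_pts pc.2 := by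
    rw [Bool.eq_iff_iff, PySem.Set.contains_iff, h2, k2]
  rw [e1, e2]
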